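-- pv_equiv track=rewrite | github.com/Intrafere/MOTO-Autonomous-ASI | backend/shared/boost_manager.py | get_available_categories
-- ===== SOURCE A (Python) =====
-- from typing import Optional, Set, Callable, Any, Dict, List
--
-- def get_available_categories(mode: str = "all") -> List[Dict[str, str]]:
--     """
--     Get list of available boost categories based on current workflow mode.
--
--     Args:
--         mode: "aggregator", "compiler", "autonomous", or "all"
--
--     Returns:
--         List of category dicts with id and label
--     """
--     categories = []
--
--     if mode in ("aggregator", "all"):
--         for i in range(1, 11):
--             categories.append({
--                 "id": f"agg_sub{i}",
--                 "label": f"Sub {i}",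
--                 "group": "Aggregator"
--             })
--         categories.append({
--             "id": "agg_val",
--             "label": "Validator",
--             "group": "Aggregator"
--         })
--
--     if mode in ("compiler", "all"):
--         categories.extend([
--             {"id": "comp_hc", "label": "High-Context", "group": "Compiler"},
--             {"id": "comp_hp", "label": "High-Param", "group": "Compiler"},
--             {"id": "comp_val", "label": "Validator", "group": "Compiler"},
--         ])
--
--     if mode in ("autonomous", "all"):
--         categories.extend([
--             {"id": "auto_te", "label": "Topic Explore", "group": "Autonomous"},
--             {"id": "auto_tev", "label": "Topic Explore Val", "group": "Autonomous"},
--             {"id": "auto_ts", "label": "Topic Sel", "group": "Autonomous"},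
--             {"id": "auto_tv", "label": "Topic Val", "group": "Autonomous"},
--             {"id": "auto_cr", "label": "Completion", "group": "Autonomous"},
--             {"id": "auto_rs", "label": "Ref Sel", "group": "Autonomous"},
--             {"id": "auto_pt", "label": "Paper Title", "group": "Autonomous"},
--             {"id": "auto_prc", "label": "Redundancy", "group": "Autonomous"},
--         ])
--
--     return categories
-- ===== SOURCE B (Python) =====
-- from typing import List, Dict
--
-- # Master spec table: (group, id, label) triples in canonical order.
-- _SPECS = (
--     [("Aggregator", f"agg_sub{i}", f"Sub {i}") for i in range(1, 11)]
--     + [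
--         ("Aggregator", "agg_val", "Validator"),
--         ("Compiler", "comp_hc", "High-Context"),
--         ("Compiler", "comp_hp", "High-Param"),
--         ("Compiler", "comp_val", "Validator"),
--         ("Autonomous", "auto_te", "Topic Explore"),
--         ("Autonomous", "auto_tev", "Topic Explore Val"),
--         ("Autonomous", "auto_ts", "Topic Sel"),
--         ("Autonomous", "auto_tv", "Topic Val"),
--         ("Autonomous", "auto_cr", "Completion"),
--         ("Autonomous", "auto_rs", "Ref Sel"),
--         ("Autonomous", "auto_pt", "Paper Title"),
--         ("Autonomous", "auto_prc", "Redundancy"),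
--     ]
-- )
--
-- _MODE_GROUP = {"aggregator": "Aggregator", "compiler": "Compiler", "autonomous": "Autonomous"}
--
--
-- def get_available_categories(mode: str = "all") -> List[Dict[str, str]]:
--     want = _MODE_GROUP.get(mode)
--     return [
--         {"id": cid, "label": label, "group": group}
--         for (group, cid, label) in _SPECS
--         if mode == "all" or group == want
--     ]
-- ===== Notes on version B (the rewrite author's own statement) =====
-- stated objective: simpler
-- what changed: B replaces A's three mode-gated build branches with a flat master table of (group,id,label) triples that is filtered by the mode's group label and then mapped to dicts in one comprehension.
import Mathlib
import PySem

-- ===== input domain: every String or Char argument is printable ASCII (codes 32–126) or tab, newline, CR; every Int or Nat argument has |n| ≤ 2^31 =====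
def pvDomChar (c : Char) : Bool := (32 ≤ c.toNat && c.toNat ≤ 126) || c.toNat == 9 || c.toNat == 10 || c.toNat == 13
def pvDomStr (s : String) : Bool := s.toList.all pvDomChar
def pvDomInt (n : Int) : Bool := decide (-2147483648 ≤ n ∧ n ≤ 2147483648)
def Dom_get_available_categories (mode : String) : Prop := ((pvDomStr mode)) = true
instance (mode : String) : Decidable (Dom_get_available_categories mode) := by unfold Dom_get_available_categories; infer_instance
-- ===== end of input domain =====

-- B replaces A's three mode-gated build branches with a flat (group,id,label) table filtered by mode's group then mapped to dicts (objective: simpler decomposition).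


-- ===== PORT A =====
-- A: categories = []; three mode-gated branches append their group's entries in order.
def get_available_categories (mode : String) : List (List (String × String)) :=
  let categories : List (List (String × String)) := []
  let categories :=
    if mode = "aggregator" ∨ mode = "all" then
      ((PySem.List.pyRange 1 11 1).foldl (fun acc i =>
          acc ++ [[("id", "agg_sub" ++ PySem.Int.toStr i),
                   ("label", "Sub " ++ PySem.Int.toStr i),
                   ("group", "Aggregator")]]) categories)
      ++ [[("id", "agg_val"), ("label", "Validator"), ("group", "Aggregator")]]
    else categories
  let categories :=
    if mode = "compiler" ∨ mode = "all" then
      categories ++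
        [[("id", "comp_hc"), ("label", "High-Context"), ("group", "Compiler")],
         [("id", "comp_hp"), ("label", "High-Param"), ("group", "Compiler")],
         [("id", "comp_val"), ("label", "Validator"), ("group", "Compiler")]]
    else categories
  let categories :=
    if mode = "autonomous" ∨ mode = "all" then
      categories ++
        [[("id", "auto_te"), ("label", "Topic Explore"), ("group", "Autonomous")],
         [("id", "auto_tev"), ("label", "Topic Explore Val"), ("group", "Autonomous")],
         [("id", "auto_ts"), ("label", "Topic Sel"), ("group", "Autonomous")],
         [("id", "auto_tv"), ("label", "Topic Val"), ("group", "Autonomous")],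
         [("id", "auto_cr"), ("label", "Completion"), ("group", "Autonomous")],
         [("id", "auto_rs"), ("label", "Ref Sel"), ("group", "Autonomous")],
         [("id", "auto_pt"), ("label", "Paper Title"), ("group", "Autonomous")],
         [("id", "auto_prc"), ("label", "Redundancy"), ("group", "Autonomous")]]
    else categories
  categories

-- ===== PORT B =====
-- B: master spec table of (group, id, label) triples; filter by the mode's group
-- label (or keep all for "all"), then map each triple to its dict.
def pvSpecs : List (String × String × String) :=
  ((PySem.List.pyRange 1 11 1).map (fun i =>
      ("Aggregator", "agg_sub" ++ PySem.Int.toStr i, "Sub " ++ PySem.Int.toStr i)))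
  ++ [("Aggregator", "agg_val", "Validator"),
      ("Compiler", "comp_hc", "High-Context"),
      ("Compiler", "comp_hp", "High-Param"),
      ("Compiler", "comp_val", "Validator"),
      ("Autonomous", "auto_te", "Topic Explore"),
      ("Autonomous", "auto_tev", "Topic Explore Val"),
      ("Autonomous", "auto_ts", "Topic Sel"),
      ("Autonomous", "auto_tv", "Topic Val"),
      ("Autonomous", "auto_cr", "Completion"),
      ("Autonomous", "auto_rs", "Ref Sel"),
      ("Autonomous", "auto_pt", "Paper Title"),
      ("Autonomous", "auto_prc", "Redundancy")]

def pvModeGroup : PySem.Dict String String :=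
  PySem.Dict.ofList
    [("aggregator", "Aggregator"), ("compiler", "Compiler"), ("autonomous", "Autonomous")]

def get_available_categories_alt (mode : String) : List (List (String × String)) :=
  let want : Option String := pvModeGroup.get? mode
  (pvSpecs.filter (fun s => mode == "all" || some s.1 == want)).map
    (fun s => [("id", s.2.1), ("label", s.2.2), ("group", s.1)])

-- ===== PRECONDITION & SPEC =====
def Spec_get_available_categories (mode : String) (out : List (List (String × String))) : Prop := out = get_available_categories_alt mode
instance (mode : String) (out : List (List (String × String))) : Decidable (Spec_get_available_categories mode out) := by unfold Spec_get_available_categories; infer_instance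

-- ===== CLAIM (what is proved, stated in full; the proofs are below) =====
def Claim_equal_get_available_categories : Prop := ∀ (mode : String), Dom_get_available_categories mode → Spec_get_available_categories mode (get_available_categories mode)

-- ===== LEMMAS AND PROOFS =====

-- ===== VERDICT (by name: the statement is the Claim_ definition above) =====
theorem get_available_categories_spec : Claim_equal_get_available_categories := by
  unfold Claim_equal_get_available_categories
  intro mode _
  show get_available_categories mode = get_available_categories_alt mode
  by_cases h1 : mode = "all"
  · subst h1; decide
  by_cases h2 : mode = "aggregator"
  · subst h2; decide
  by_cases h3 : mode = "compiler"
  · subst h3; decide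
  by_cases h4 : mode = "autonomous"
  · subst h4; decide
  · -- unknown mode: A's three gates are all false; B's group lookup is none,
    -- so no spec row passes the filter and both sides are [].
    have t : pvModeGroup.get? mode = none := by
      simp [pvModeGroup, PySem.Dict.ofList, PySem.Dict.update, PySem.Dict.empty,
        PySem.Dict.insert, PySem.Dict.contains, PySem.Dict.get?]
      exact ⟨fun h => h2 h.symm, fun h => h3 h.symm, fun h => h4 h.symm⟩
    simp only [get_available_categories, get_available_categories_alt, t,
      if_neg (show ¬ (mode = "aggregator" ∨ mode = "all") by simp [h1, h2]),
      if_neg (show ¬ (mode = "compiler" ∨ mode = "all") by simp [h1, h3]),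
      if_neg (show ¬ (mode = "autonomous" ∨ mode = "all") by simp [h1, h4])]
    have hne : (mode == "all") = false := by simp [h1]
    simp [hne]
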